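-- pv_equiv track=rewrite | github.com/francescopeluso/AOC25 | day02/main.py | part_two
-- ===== SOURCE A (Python) =====
-- def part_two(data):
--
--   invalid_ids_sum = 0
--
--   for start, end in data:
--     for id in range(start, end + 1):
--       id_str = str(id)
--       length = len(id_str)
--
--       for pattern_len in range(1, length // 2 + 1):
--
--         # if the length of the id is divisible by the pattern length,
--         # we can check if the pattern repeated forms the id.
--         if length % pattern_len == 0:
--           pattern = id_str[:pattern_len]
--           repetitions = length // pattern_len
--
--           # stupid example: 222222 is a invalid id. 222221 is not.
--           # pattern must match the whole id, not just part of it.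
--           if pattern * repetitions == id_str:
--             invalid_ids_sum += id
--             break
--
--   return invalid_ids_sum
-- ===== SOURCE B (Python) =====
-- def part_two(data):
--   total = 0
--   for start, end in data:
--     # directly enumerate the periodic numbers (pattern repeated >= 2 times) up to end
--     seen = set()
--     cap = len(str(end))
--     for p in range(1, cap // 2 + 1):
--       for v in range(10 ** (p - 1), 10 ** p):
--         n = v
--         for _ in range(2, cap // p + 1):
--           n = n * 10 ** p + v
--           if start <= n <= end:
--             seen.add(n)
--     total += sum(seen)
--   return total
-- ===== Notes on version B (the rewrite author's own statement) =====
-- stated objective: faster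
-- what changed: Instead of scanning every id in each range and testing its digit string for periodicity, B directly constructs all periodic numbers (a p-digit pattern value v repeated k>=2 times, built arithmetically as n -> n*10^p + v) up to the number of digits of end, dedupes them in a set and sums those lying in [start, end].
import Mathlib
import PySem

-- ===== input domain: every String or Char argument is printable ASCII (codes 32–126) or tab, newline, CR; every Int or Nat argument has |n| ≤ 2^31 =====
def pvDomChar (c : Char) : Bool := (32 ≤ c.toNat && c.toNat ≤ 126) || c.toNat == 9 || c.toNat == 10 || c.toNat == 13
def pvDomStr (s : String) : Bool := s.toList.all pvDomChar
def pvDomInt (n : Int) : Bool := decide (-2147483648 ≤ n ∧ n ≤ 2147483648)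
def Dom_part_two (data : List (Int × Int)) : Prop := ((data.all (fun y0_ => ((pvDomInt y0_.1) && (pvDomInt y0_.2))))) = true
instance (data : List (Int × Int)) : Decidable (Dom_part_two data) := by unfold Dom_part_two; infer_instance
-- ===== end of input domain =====

-- B enumerates the periodic numbers directly (a p-digit pattern value v repeated k ≥ 2 times, built
-- arithmetically as n ↦ n*10^p + v) up to the digit count of end, dedupes them in a set and sums those
-- in [start, end], instead of A's scan of every id in the range with a string periodicity test; objective: faster.


-- ===== PORT A =====
-- inner 'for pattern_len in …: … break' loop of A: returns the updated accumulator
def partTwoPatLoop (idStr : List Char) (length : Int) (id : Int) (acc : Int) : List Int → Int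
  | [] => acc
  | patternLen :: rest =>
    if PySem.Int.mod length patternLen == 0 then
      let pattern := PySem.List.slice idStr none (some patternLen)
      let repetitions := PySem.Int.floordiv length patternLen
      if PySem.List.pyRepeat pattern repetitions == idStr then acc + id
      else partTwoPatLoop idStr length id acc rest
    else partTwoPatLoop idStr length id acc rest

def part_two (data : List (Int × Int)) : Int :=
  data.foldl (fun invalidIdsSum se =>
    (PySem.List.pyRange se.1 (se.2 + 1) 1).foldl (fun acc id =>
      let idStr := PySem.Int.toChars id
      let length := PySem.List.len idStr
      partTwoPatLoop idStr length id acc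
        (PySem.List.pyRange 1 (PySem.Int.floordiv length 2 + 1) 1)) invalidIdsSum) 0

-- ===== PORT B =====
-- '10 ** p' / '10 ** (p - 1)' are ported as (10:Int) ^ p.toNat / (10:Int) ^ (p-1).toNat: exact, since
-- p ranges over pyRange 1 …, so both exponents are nonnegative exactly as in the Python.
def part_two_alt (data : List (Int × Int)) : Int :=
  data.foldl (fun total se =>
    let cap := PySem.List.len (PySem.Int.toChars se.2)
    let seen : PySem.Set Int :=
      (PySem.List.pyRange 1 (PySem.Int.floordiv cap 2 + 1) 1).foldl (fun seen p =>
        (PySem.List.pyRange ((10:Int) ^ (p - 1).toNat) ((10:Int) ^ p.toNat) 1).foldl (fun seen v =>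
          ((PySem.List.pyRange 2 (PySem.Int.floordiv cap p + 1) 1).foldl (fun st (_ : Int) =>
            let n := st.1 * (10:Int) ^ p.toNat + v
            (n, if se.1 ≤ n ∧ n ≤ se.2 then PySem.Set.add st.2 n else st.2)) (v, seen)).2) seen)
        PySem.Set.empty
    total + seen.sum) 0

-- ===== PRECONDITION & SPEC =====
def Spec_part_two (data : List (Int × Int)) (out : Int) : Prop := out = part_two_alt data
instance (data : List (Int × Int)) (out : Int) : Decidable (Spec_part_two data out) := by unfold Spec_part_two; infer_instance

-- ===== CLAIM (what is proved, stated in full; the proofs are below) =====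
def Claim_equal_part_two : Prop := ∀ (data : List (Int × Int)), Dom_part_two data → Spec_part_two data (part_two data)

-- ===== LEMMAS AND PROOFS =====

-- ---------- shared notions ----------

-- A's test for one candidate pattern length (Nat form, on the digit string)
def repOK (cs : List Char) (p : Nat) : Prop :=
  (List.replicate (cs.length / p) (cs.take p)).flatten = cs

-- A's per-id condition, in Nat form
def invalidA (id : Int) : Prop :=
  ∃ p : Nat, 1 ≤ p ∧ p ≤ (PySem.Int.toChars id).length / 2 ∧
    p ∣ (PySem.Int.toChars id).length ∧ repOK (PySem.Int.toChars id) p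

-- the number whose decimal string is (j+1) copies of the P-digit string of v
def repN (v P : Nat) : Nat → Nat
  | 0 => v
  | j+1 => repN v P j * 10 ^ P + v

def repNI (v : Int) (P : Nat) : Nat → Int
  | 0 => v
  | j+1 => repNI v P j * (10:Int) ^ P + v

-- B's per-id condition
def Periodic (x : Int) : Prop :=
  ∃ P v j : Nat, 1 ≤ P ∧ 10 ^ (P - 1) ≤ v ∧ v < 10 ^ P ∧ 1 ≤ j ∧ x = ((repN v P j : Nat) : Int)

-- A's per-id test as a Bool (exactly the candidate test of partTwoPatLoop)
def invalidABool (id : Int) : Bool :=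
  (PySem.List.pyRange 1 (PySem.Int.floordiv (PySem.List.len (PySem.Int.toChars id)) 2 + 1) 1).any (fun p =>
    PySem.Int.mod (PySem.List.len (PySem.Int.toChars id)) p == 0 &&
      (PySem.List.pyRepeat (PySem.List.slice (PySem.Int.toChars id) none (some p))
        (PySem.Int.floordiv (PySem.List.len (PySem.Int.toChars id)) p) == PySem.Int.toChars id))

-- B's inner loop body, named for the proofs
def bStep (start e v : Int) (P : Nat) (st : Int × PySem.Set Int) (_ : Int) : Int × PySem.Set Int :=
  let n := st.1 * (10:Int) ^ P + v
  (n, if start ≤ n ∧ n ≤ e then PySem.Set.add st.2 n else st.2)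

-- B's per-range set of collected ids
def seenOf (start e : Int) : PySem.Set Int :=
  (PySem.List.pyRange 1 (PySem.Int.floordiv (PySem.List.len (PySem.Int.toChars e)) 2 + 1) 1).foldl (fun seen p =>
    (PySem.List.pyRange ((10:Int) ^ (p - 1).toNat) ((10:Int) ^ p.toNat) 1).foldl (fun seen v =>
      ((PySem.List.pyRange 2 (PySem.Int.floordiv (PySem.List.len (PySem.Int.toChars e)) p + 1) 1).foldl
        (bStep start e v p.toNat) (v, seen)).2) seen)
    PySem.Set.empty

theorem part_two_alt_eq (data : List (Int × Int)) :
    part_two_alt data = data.foldl (fun total se => total + (seenOf se.1 se.2).sum) 0 := rfl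

-- ---------- str(n) vs Nat.digits ----------

set_option maxHeartbeats 1000000 in
theorem toDigitsCore_eq (f : Nat) : ∀ (n : Nat) (acc : List Char), 0 < n → n ≤ f →
    Nat.toDigitsCore 10 f n acc = ((Nat.digits 10 n).map Nat.digitChar).reverse ++ acc := by
  induction f with
  | zero => intro n acc h1 h2; omega
  | succ f ih =>
    intro n acc h1 _
    rw [Nat.toDigitsCore]
    by_cases h : n / 10 = 0
    · rw [if_pos h, Nat.digits_def' (by norm_num : (1:Nat) < 10) h1, h]
      simp
    · rw [if_neg h, ih (n / 10) _ (by omega) (by omega)]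
      rw [Nat.digits_def' (by norm_num) h1]
      simp

set_option maxHeartbeats 1000000 in
theorem toChars_pos (n : Int) (h : 0 < n) :
    PySem.Int.toChars n = ((Nat.digits 10 n.toNat).map Nat.digitChar).reverse := by
  unfold PySem.Int.toChars
  rw [if_neg (by omega)]
  unfold Nat.toDigits
  rw [toDigitsCore_eq (n.toNat + 1) n.toNat [] (by omega) (by omega)]
  simp

set_option maxHeartbeats 1000000 in
theorem toChars_neg (n : Int) (h : n < 0) :
    PySem.Int.toChars n = '-' :: ((Nat.digits 10 n.natAbs).map Nat.digitChar).reverse := by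
  unfold PySem.Int.toChars
  rw [if_pos h]
  unfold Nat.toDigits
  rw [toDigitsCore_eq (n.natAbs + 1) n.natAbs [] (by omega) (by omega)]
  simp

theorem digitChar_ne_dash (d : Nat) : Nat.digitChar d ≠ '-' := by
  by_cases h : d < 16
  · interval_cases d <;> decide
  · have h16 : Nat.digitChar d = '*' := by
      unfold Nat.digitChar
      rw [if_neg (by omega), if_neg (by omega), if_neg (by omega), if_neg (by omega),
        if_neg (by omega), if_neg (by omega), if_neg (by omega), if_neg (by omega),
        if_neg (by omega), if_neg (by omega), if_neg (by omega), if_neg (by omega),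
        if_neg (by omega), if_neg (by omega), if_neg (by omega), if_neg (by omega)]
    rw [h16]
    decide

theorem digitChar_inj (a b : Nat) (ha : a < 10) (hb : b < 10) (h : Nat.digitChar a = Nat.digitChar b) : a = b := by
  interval_cases a <;> interval_cases b <;> first | rfl | (exfalso; revert h; decide)

theorem map_digitChar_inj : ∀ (l1 l2 : List Nat), (∀ d ∈ l1, d < 10) → (∀ d ∈ l2, d < 10) →
    l1.map Nat.digitChar = l2.map Nat.digitChar → l1 = l2 := by
  intro l1
  induction l1 with
  | nil => intro l2 _ _ h; cases l2 <;> simp_all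
  | cons a t ih =>
    intro l2 h1 h2 h
    cases l2 with
    | nil => simp_all
    | cons b t2 =>
      simp only [List.map_cons, List.cons.injEq] at h
      have := digitChar_inj a b (h1 a (by simp)) (h2 b (by simp)) h.1
      rw [this, ih t2 (fun d hd => h1 d (by simp [hd])) (fun d hd => h2 d (by simp [hd])) h.2]

-- ---------- repN and digits ----------

theorem len_digits_eq (v P : Nat) (hP : 1 ≤ P) (h1 : 10 ^ (P - 1) ≤ v) (h2 : v < 10 ^ P) :
    (Nat.digits 10 v).length = P := by
  have a := (Nat.digits_length_le_iff (by norm_num) v).mpr h2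
  have b := (Nat.lt_digits_length_iff (b := 10) (k := P - 1) (by norm_num) v).mpr h1
  omega

theorem digits_len_mono (a b : Nat) (h : a ≤ b) :
    (Nat.digits 10 a).length ≤ (Nat.digits 10 b).length := by
  rw [Nat.digits_length_le_iff (by norm_num)]
  exact lt_of_le_of_lt h (Nat.lt_base_pow_length_digits (by norm_num))

theorem digits_repN (v P : Nat) (hlen : (Nat.digits 10 v).length = P) :
    ∀ j, Nat.digits 10 (repN v P j) = (List.replicate (j + 1) (Nat.digits 10 v)).flatten := by
  intro j
  induction j with
  | zero => simp [repN]
  | succ j ih =>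
    have h := Nat.digits_append_digits (b := 10) (n := v) (m := repN v P j) (by norm_num)
    rw [hlen] at h
    have h2 : repN v P (j + 1) = v + 10 ^ P * repN v P j := by rw [repN]; ring
    rw [h2, ← h, ih]
    simp [List.replicate_succ]

theorem repNI_natCast (v P : Nat) : ∀ j, repNI (v : Int) P j = ((repN v P j : Nat) : Int) := by
  intro j
  induction j with
  | zero => simp [repNI, repN]
  | succ j ih => rw [repNI, repN, ih]; push_cast; ring

theorem repN_ge_v (v P : Nat) : ∀ j, v ≤ repN v P j := by
  intro j
  induction j with
  | zero => simp [repN]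
  | succ j ih => rw [repN]; exact Nat.le_add_left v _

theorem ten_lt_repN (v P j : Nat) (hP : 1 ≤ P) (hv : 1 ≤ v) (hj : 1 ≤ j) : 10 < repN v P j := by
  obtain ⟨j', rfl⟩ : ∃ j', j = j' + 1 := ⟨j - 1, by omega⟩
  rw [repN]
  have h1 : 1 ≤ repN v P j' := le_trans hv (repN_ge_v v P j')
  have h2 : (10:Nat) ≤ 10 ^ P := by
    calc (10:Nat) = 10 ^ 1 := (pow_one 10).symm
    _ ≤ 10 ^ P := Nat.pow_le_pow_right (by norm_num) hP
  have h3 : 10 ^ P ≤ repN v P j' * 10 ^ P := Nat.le_mul_of_pos_left _ h1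
  omega

-- ---------- flatten/replicate utilities ----------

theorem length_flatten_replicate {α : Type} (k : Nat) (u : List α) :
    ((List.replicate k u).flatten).length = k * u.length := by
  induction k with
  | zero => simp
  | succ k ih => rw [List.replicate_succ, List.flatten_cons, List.length_append, ih]; ring

theorem take_flatten_replicate {α : Type} (k : Nat) (u : List α) (hk : 1 ≤ k) :
    ((List.replicate k u).flatten).take u.length = u := by
  obtain ⟨k', rfl⟩ : ∃ k', k = k' + 1 := ⟨k - 1, by omega⟩
  rw [List.replicate_succ, List.flatten_cons, List.take_left]

theorem rev_flatten_replicate {α : Type} (k : Nat) (u : List α) :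
    ((List.replicate k u).flatten).reverse = (List.replicate k u.reverse).flatten := by
  induction k with
  | zero => simp
  | succ k ih => rw [List.replicate_succ, List.flatten_cons, List.reverse_append, ih,
      List.replicate_succ' (n := k), List.flatten_append]; simp

theorem map_flatten_replicate {α β : Type} (f : α → β) (k : Nat) (u : List α) :
    ((List.replicate k u).flatten).map f = (List.replicate k (u.map f)).flatten := by
  induction k with
  | zero => simp
  | succ k ih => simp [List.replicate_succ, ih]

-- ---------- the crux: A's string periodicity = B's arithmetic construction ----------

theorem invalidA_iff_Periodic (x : Int) : invalidA x ↔ Periodic x := by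
  constructor
  · rintro ⟨p, hp1, hp2, hpd, hrep⟩
    have hp2' : p * 2 ≤ (PySem.Int.toChars x).length :=
      (Nat.le_div_iff_mul_le (by norm_num)).mp hp2
    set s := PySem.Int.toChars x with hs
    have hL2 : 2 ≤ s.length := by omega
    have hk2 : 2 ≤ s.length / p := by
      rw [Nat.le_div_iff_mul_le (by omega : 0 < p)]; omega
    rcases lt_trichotomy x 0 with hneg | hzero | hpos
    · exfalso
      have hsn : s = '-' :: ((Nat.digits 10 x.natAbs).map Nat.digitChar).reverse :=
        toChars_neg x hneg
      set body := ((Nat.digits 10 x.natAbs).map Nat.digitChar).reverse with hbody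
      set k := s.length / p with hkdef
      set u := s.take p with hudef
      have hflat : (List.replicate k u).flatten = s := hrep
      have hplen : p ≤ s.length := by omega
      have hulen : u.length = p := by rw [hudef, List.length_take]; omega
      have hsplit : s = u ++ (List.replicate (k-1) u).flatten := by
        conv_lhs => rw [← hflat]
        obtain ⟨k', hk'⟩ : ∃ k', k = k' + 1 := ⟨k - 1, by omega⟩
        rw [hk']
        simp [List.replicate_succ]
      have hdash_u : '-' ∈ u := by
        rw [hudef, hsn]
        obtain ⟨p', hp'⟩ : ∃ p', p = p' + 1 := ⟨p - 1, by omega⟩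
        rw [hp', List.take_succ_cons]
        simp
      have hdash_drop : '-' ∈ s.drop p := by
        have hd : s.drop p = (List.replicate (k-1) u).flatten := by
          conv_lhs => rw [hsplit, ← hulen, List.drop_left]
        rw [hd]
        exact List.mem_flatten.mpr ⟨u, List.mem_replicate.mpr ⟨by omega, rfl⟩, hdash_u⟩
      have hmem : '-' ∈ body := by
        rw [hsn] at hdash_drop
        obtain ⟨p', hp'⟩ : ∃ p', p = p' + 1 := ⟨p - 1, by omega⟩
        rw [hp', List.drop_succ_cons] at hdash_drop
        exact List.mem_of_mem_drop hdash_drop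
      rw [hbody, List.mem_reverse] at hmem
      obtain ⟨d, _, hd⟩ := List.mem_map.mp hmem
      exact digitChar_ne_dash d hd
    · exfalso
      have h0 : s = ['0'] := by rw [hs, hzero]; decide
      rw [h0] at hL2
      simp at hL2
    · -- x > 0
      have hxb := toChars_pos x hpos
      set dl := Nat.digits 10 x.toNat with hdl
      have hLdl : s.length = dl.length := by rw [hs, hxb]; simp
      set k := s.length / p with hkdef
      have hLk : s.length = k * p := by rw [hkdef, Nat.div_mul_cancel hpd]
      set u := s.take p with hudef
      have hplen : p ≤ s.length := by omega
      have hulen : u.length = p := by rw [hudef, List.length_take]; omega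
      have hflat : (List.replicate k u).flatten = s := hrep
      have hmap : dl.map Nat.digitChar = (List.replicate k u.reverse).flatten := by
        have h1 : (dl.map Nat.digitChar).reverse = (List.replicate k u).flatten := by
          rw [← hxb, ← hs, hflat]
        calc dl.map Nat.digitChar = ((dl.map Nat.digitChar).reverse).reverse := by simp
        _ = ((List.replicate k u).flatten).reverse := by rw [h1]
        _ = (List.replicate k u.reverse).flatten := rev_flatten_replicate k u
      set w := dl.take p with hwdef
      have hwlen : w.length = p := by rw [hwdef, List.length_take]; omega
      have hmapw : w.map Nat.digitChar = u.reverse := by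
        have hrl : u.reverse.length = p := by simp [hulen]
        have h1 : (dl.map Nat.digitChar).take p = u.reverse := by
          rw [hmap, ← hrl]
          exact take_flatten_replicate k u.reverse (by omega)
        rw [← h1, hwdef, List.map_take]
      have hdl10 : ∀ d ∈ dl, d < 10 := fun d hd => Nat.digits_lt_base (by norm_num) hd
      have hw10 : ∀ d ∈ w, d < 10 := fun d hd => hdl10 d (List.mem_of_mem_take hd)
      have hdlrep : dl = (List.replicate k w).flatten := by
        refine (map_digitChar_inj _ _ ?_ hdl10 ?_).symm
        · intro d hd
          obtain ⟨l', hl', hdl'⟩ := List.mem_flatten.mp hd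
          rw [(List.mem_replicate.mp hl').2] at hdl'
          exact hw10 d hdl'
        · rw [map_flatten_replicate, hmapw, ← hmap]
      have hxne : x.toNat ≠ 0 := by omega
      have hdlne : dl ≠ [] := Nat.digits_ne_nil_iff_ne_zero.mpr hxne
      have hwne : w ≠ [] := by
        intro hc; rw [hc] at hwlen; simp at hwlen; omega
      have hwlast : ∀ (h : w ≠ []), w.getLast h ≠ 0 := by
        intro hw
        have hsplit : dl = (List.replicate (k-1) w).flatten ++ w := by
          rw [hdlrep]
          obtain ⟨k', hk'⟩ : ∃ k', k = k' + 1 := ⟨k - 1, by omega⟩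
          rw [hk', List.replicate_succ' (n := k'), List.flatten_append]
          simp
        have hq : dl.getLast? = w.getLast? := by
          rw [hsplit, List.getLast?_append_of_ne_nil _ hwne]
        have h1 : dl.getLast? = some (dl.getLast hdlne) := List.getLast?_eq_some_getLast hdlne
        have h2 : w.getLast? = some (w.getLast hw) := List.getLast?_eq_some_getLast hw
        have h3 : some (dl.getLast hdlne) = some (w.getLast hw) := by rw [← h1, hq, h2]
        have h4 := Option.some.inj h3
        have hlast : dl.getLast hdlne ≠ 0 := Nat.getLast_digit_ne_zero 10 hxne
        rw [h4] at hlast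
        exact hlast
      set v : Nat := Nat.ofDigits 10 w with hv
      have hdv : Nat.digits 10 v = w := Nat.digits_ofDigits 10 (by norm_num) w hw10 hwlast
      have hvlen : (Nat.digits 10 v).length = p := by rw [hdv, hwlen]
      have hvlt : v < 10 ^ p := by
        have := Nat.lt_base_pow_length_digits (b := 10) (m := v) (by norm_num)
        rwa [hvlen] at this
      have hvge : 10 ^ (p - 1) ≤ v := by
        have := (Nat.lt_digits_length_iff (b := 10) (k := p - 1) (by norm_num) v).mp (by omega)
        exact this
      refine ⟨p, v, k - 1, hp1, hvge, hvlt, by omega, ?_⟩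
      have hdr := digits_repN v p hvlen (k - 1)
      have hk1 : k - 1 + 1 = k := by omega
      rw [hk1, hdv, ← hdlrep, hdl] at hdr
      have := Nat.digits_inj_iff.mp hdr
      rw [this]
      omega
  · rintro ⟨P, v, j, hP, hv1, hv2, hj, hx⟩
    have hv0 : 1 ≤ v := le_trans (Nat.one_le_pow _ _ (by norm_num)) hv1
    have hxpos : (0:Int) < x := by
      rw [hx]
      have := le_trans hv0 (repN_ge_v v P j)
      exact_mod_cast this
    have hxn : x.toNat = repN v P j := by omega
    have hdvlen : (Nat.digits 10 v).length = P := len_digits_eq v P hP hv1 hv2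
    have hdl : Nat.digits 10 x.toNat = (List.replicate (j + 1) (Nat.digits 10 v)).flatten := by
      rw [hxn]; exact digits_repN v P hdvlen j
    set u := ((Nat.digits 10 v).map Nat.digitChar).reverse with hu
    have hulen : u.length = P := by simp [hu, hdvlen]
    have hsflat : PySem.Int.toChars x = (List.replicate (j + 1) u).flatten := by
      rw [toChars_pos x hxpos, hdl, map_flatten_replicate, rev_flatten_replicate]
    have hslen : (PySem.Int.toChars x).length = (j + 1) * P := by
      rw [hsflat, length_flatten_replicate, hulen]
    refine ⟨P, hP, ?_, ?_, ?_⟩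
    · rw [hslen, Nat.le_div_iff_mul_le (by norm_num)]
      nlinarith
    · exact ⟨j + 1, by rw [hslen]; ring⟩
    · unfold repOK
      have hLP : (PySem.Int.toChars x).length / P = j + 1 := by
        rw [hslen, Nat.mul_div_cancel _ (by omega)]
      have htake : (PySem.Int.toChars x).take P = u := by
        rw [hsflat, ← hulen]
        exact take_flatten_replicate (j + 1) u (by omega)
      rw [hLP, htake, ← hsflat]

-- ---------- A's side: per-range sum of invalid ids ----------

theorem patLoop_eq (idStr : List Char) (length id acc : Int) (ps : List Int) :
    partTwoPatLoop idStr length id acc ps =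
      if ps.any (fun p => PySem.Int.mod length p == 0 &&
          (PySem.List.pyRepeat (PySem.List.slice idStr none (some p)) (PySem.Int.floordiv length p) == idStr))
      then acc + id else acc := by
  induction ps with
  | nil => simp [partTwoPatLoop]
  | cons p rest ih =>
    simp only [partTwoPatLoop, List.any_cons]
    by_cases h1 : PySem.Int.mod length p == 0
    · simp only [h1, Bool.true_and]
      by_cases h2 : PySem.List.pyRepeat (PySem.List.slice idStr none (some p)) (PySem.Int.floordiv length p) == idStr
      · simp [h2]
      · simp only [h2, ih]
        simp
    · simp only [ih]
      simp at h1
      simp [h1]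

theorem anyA_any (s : List Char) :
    ((PySem.List.pyRange 1 (PySem.Int.floordiv (PySem.List.len s) 2 + 1) 1).any (fun p =>
        PySem.Int.mod (PySem.List.len s) p == 0 &&
          (PySem.List.pyRepeat (PySem.List.slice s none (some p)) (PySem.Int.floordiv (PySem.List.len s) p) == s)) = true) ↔
      ∃ p : Nat, 1 ≤ p ∧ p ≤ s.length / 2 ∧ p ∣ s.length ∧ repOK s p := by
  have hlen : PySem.List.len s = (s.length : Int) := PySem.List.len_eq s
  have h2 : PySem.Int.floordiv (s.length : Int) 2 = ((s.length / 2 : Nat) : Int) := by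
    exact_mod_cast PySem.Int.floordiv_natCast s.length 2
  simp only [List.any_eq_true, PySem.List.mem_pyRange_one, hlen, h2]
  constructor
  · rintro ⟨p, ⟨hp1, hp2⟩, hcond⟩
    lift p to Nat using (by omega) with P
    refine ⟨P, by exact_mod_cast hp1, by exact_mod_cast (by omega : (P : Int) ≤ ((s.length / 2 : Nat) : Int)), ?_, ?_⟩
    · simp only [Bool.and_eq_true, beq_iff_eq] at hcond
      have := (PySem.Int.mod_eq_zero_iff_dvd _ _).mp hcond.1
      exact_mod_cast this
    · simp only [Bool.and_eq_true, beq_iff_eq, PySem.List.slice_to_natCast,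
        PySem.Int.floordiv_natCast, PySem.List.pyRepeat, Int.toNat_natCast] at hcond
      exact hcond.2
  · rintro ⟨P, hp1, hp2, hpd, hrep⟩
    refine ⟨(P : Int), ⟨by exact_mod_cast hp1, by exact_mod_cast (by omega : (P:Int) < ((s.length / 2 : Nat) : Int) + 1)⟩, ?_⟩
    simp only [Bool.and_eq_true, beq_iff_eq, PySem.List.slice_to_natCast,
      PySem.Int.floordiv_natCast, PySem.List.pyRepeat, Int.toNat_natCast]
    exact ⟨(PySem.Int.mod_eq_zero_iff_dvd _ _).mpr (by exact_mod_cast hpd), hrep⟩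

theorem anyA_iff (id : Int) : invalidABool id = true ↔ invalidA id := by
  unfold invalidABool invalidA
  exact anyA_any (PySem.Int.toChars id)

theorem per_id (acc id : Int) :
    partTwoPatLoop (PySem.Int.toChars id) (PySem.List.len (PySem.Int.toChars id)) id acc
        (PySem.List.pyRange 1 (PySem.Int.floordiv (PySem.List.len (PySem.Int.toChars id)) 2 + 1) 1) =
      acc + (if invalidABool id then id else 0) := by
  rw [patLoop_eq]
  have h : ((PySem.List.pyRange 1 (PySem.Int.floordiv (PySem.List.len (PySem.Int.toChars id)) 2 + 1) 1).any (fun p =>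
      PySem.Int.mod (PySem.List.len (PySem.Int.toChars id)) p == 0 &&
        (PySem.List.pyRepeat (PySem.List.slice (PySem.Int.toChars id) none (some p))
          (PySem.Int.floordiv (PySem.List.len (PySem.Int.toChars id)) p) == PySem.Int.toChars id)))
      = invalidABool id := rfl
  rw [h]
  by_cases hb : invalidABool id <;> simp [hb]

theorem filter_sum_eq_map_sum (l : List Int) (p : Int → Bool) :
    (l.filter p).sum = (l.map (fun x => if p x then x else 0)).sum := by
  induction l with
  | nil => rfl
  | cons x t ih =>
    by_cases h : p x <;> simp [h, ih]

theorem A_range (start e acc : Int) :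
    (PySem.List.pyRange start (e + 1) 1).foldl (fun acc id =>
      partTwoPatLoop (PySem.Int.toChars id) (PySem.List.len (PySem.Int.toChars id)) id acc
        (PySem.List.pyRange 1 (PySem.Int.floordiv (PySem.List.len (PySem.Int.toChars id)) 2 + 1) 1)) acc
      = acc + ((PySem.List.pyRange start (e + 1) 1).filter invalidABool).sum := by
  rw [PySem.List.foldl_congr_mem _ _
    (fun acc id => acc + (if invalidABool id then id else 0)) _
    (fun acc id _ => per_id acc id)]
  rw [PySem.List.foldl_add]
  rw [filter_sum_eq_map_sum]

-- ---------- B's side: membership in the per-range set ----------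

theorem foldl_set_mem {α : Type} (l : List α) (f : PySem.Set Int → α → PySem.Set Int)
    (Q : α → Int → Prop) (hf : ∀ s x y, y ∈ f s x ↔ y ∈ s ∨ Q x y) :
    ∀ (s : PySem.Set Int) (y : Int), y ∈ l.foldl f s ↔ y ∈ s ∨ ∃ x ∈ l, Q x y := by
  induction l with
  | nil => simp
  | cons a t ih =>
    intro s y
    rw [List.foldl_cons, ih, hf]
    constructor
    · rintro ((h | h) | ⟨x, hx, h⟩)
      · exact Or.inl h
      · exact Or.inr ⟨a, by simp, h⟩
      · exact Or.inr ⟨x, by simp [hx], h⟩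
    · rintro (h | ⟨x, hx, h⟩)
      · exact Or.inl (Or.inl h)
      · rcases List.mem_cons.mp hx with rfl | hx
        · exact Or.inl (Or.inr h)
        · exact Or.inr ⟨x, hx, h⟩

theorem foldl_set_nodup {α : Type} (l : List α) (f : PySem.Set Int → α → PySem.Set Int)
    (hf : ∀ s x, List.Nodup s → List.Nodup (f s x)) :
    ∀ (s : PySem.Set Int), List.Nodup s → List.Nodup (l.foldl f s) := by
  induction l with
  | nil => intro s h; simpa using h
  | cons a t ih => intro s h; exact ih _ (hf s a h)

theorem bStep_app (start e v : Int) (P : Nat) (m : Int) (s : PySem.Set Int) (x : Int) :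
    bStep start e v P (m, s) x =
      (m * (10:Int) ^ P + v,
        if start ≤ m * (10:Int) ^ P + v ∧ m * (10:Int) ^ P + v ≤ e
        then PySem.Set.add s (m * (10:Int) ^ P + v) else s) := rfl

theorem bStep_app_rep (start e v : Int) (P : Nat) (t : Nat) (s : PySem.Set Int) (x : Int) :
    bStep start e v P (repNI v P t, s) x =
      (repNI v P (t + 1),
        if start ≤ repNI v P (t + 1) ∧ repNI v P (t + 1) ≤ e
        then PySem.Set.add s (repNI v P (t + 1)) else s) := by
  rw [bStep_app]
  have h : repNI v P t * (10:Int) ^ P + v = repNI v P (t + 1) := by rw [repNI]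
  rw [h]

theorem inner_mem (start e v : Int) (P : Nat) (l : List Int) :
    ∀ (t : Nat) (s : PySem.Set Int) (y : Int),
      (y ∈ (l.foldl (bStep start e v P) (repNI v P t, s)).2)
        ↔ y ∈ s ∨ ∃ j : Nat, t < j ∧ j ≤ t + l.length ∧ y = repNI v P j ∧ start ≤ y ∧ y ≤ e := by
  induction l with
  | nil =>
    intro t s y
    simp only [List.foldl_nil, List.length_nil, Nat.add_zero]
    constructor
    · exact Or.inl
    · rintro (h | ⟨j, h1, h2, _⟩)
      · exact h
      · omega
  | cons a tl ih =>
    intro t s y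
    rw [List.foldl_cons, bStep_app_rep, ih (t+1)]
    constructor
    · rintro (h | ⟨j, hj1, hj2, hj3, hj4⟩)
      · by_cases hc : start ≤ repNI v P (t+1) ∧ repNI v P (t+1) ≤ e
        · rw [if_pos hc, PySem.Set.mem_add] at h
          rcases h with h | h
          · exact Or.inl h
          · exact Or.inr ⟨t+1, by omega, by simp only [List.length_cons]; omega, h, h ▸ hc.1, h ▸ hc.2⟩
        · rw [if_neg hc] at h
          exact Or.inl h
      · exact Or.inr ⟨j, by omega, by simp only [List.length_cons] at hj2 ⊢; omega, hj3, hj4⟩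
    · rintro (h | ⟨j, hj1, hj2, hj3, hj4, hj5⟩)
      · left
        split_ifs with hc
        · rw [PySem.Set.mem_add]; exact Or.inl h
        · exact h
      · by_cases hj : j = t + 1
        · subst hj
          left
          rw [if_pos ⟨hj3 ▸ hj4, hj3 ▸ hj5⟩, PySem.Set.mem_add]
          exact Or.inr hj3
        · exact Or.inr ⟨j, by omega, by simp only [List.length_cons] at hj2 ⊢; omega, hj3, hj4, hj5⟩

theorem inner_mem0 (start e v : Int) (P : Nat) (l : List Int) (s : PySem.Set Int) (y : Int) :
    (y ∈ (l.foldl (bStep start e v P) (v, s)).2)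
      ↔ y ∈ s ∨ ∃ j : Nat, 0 < j ∧ j ≤ l.length ∧ y = repNI v P j ∧ start ≤ y ∧ y ≤ e := by
  have h := inner_mem start e v P l 0 s y
  simp only [Nat.zero_add] at h
  rw [show ((v, s) : Int × PySem.Set Int) = (repNI v P 0, s) from rfl]
  exact h

theorem inner_nodup (start e v : Int) (P : Nat) (l : List Int) :
    ∀ (st : Int × PySem.Set Int), List.Nodup st.2 →
      List.Nodup (l.foldl (bStep start e v P) st).2 := by
  induction l with
  | nil => intro st h; simpa using h
  | cons a tl ih =>
    intro st h
    rw [List.foldl_cons]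
    apply ih
    rcases st with ⟨m, s⟩
    rw [bStep_app]
    simp only []
    split_ifs with hc
    · exact PySem.Set.nodup_add s _ h
    · exact h

theorem seenOf_nodup (start e : Int) : List.Nodup (seenOf start e) := by
  unfold seenOf
  apply foldl_set_nodup
  · intro s p hs
    apply foldl_set_nodup
    · intro s' v hs'
      exact inner_nodup start e v p.toNat _ (v, s') hs'
    · exact hs
  · exact List.nodup_nil

-- membership in B's per-range set, with the loop bounds still explicit
theorem seenOf_mem_raw (start e y : Int) :
    y ∈ seenOf start e ↔
      ∃ p ∈ PySem.List.pyRange 1 (PySem.Int.floordiv (PySem.List.len (PySem.Int.toChars e)) 2 + 1) 1,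
        ∃ v ∈ PySem.List.pyRange ((10:Int) ^ (p - 1).toNat) ((10:Int) ^ p.toNat) 1,
          ∃ j : Nat, 0 < j ∧
            j ≤ (PySem.List.pyRange 2 (PySem.Int.floordiv (PySem.List.len (PySem.Int.toChars e)) p + 1) 1).length ∧
            y = repNI v p.toNat j ∧ start ≤ y ∧ y ≤ e := by
  unfold seenOf
  rw [foldl_set_mem _ _ (fun p y =>
    ∃ v ∈ PySem.List.pyRange ((10:Int) ^ (p - 1).toNat) ((10:Int) ^ p.toNat) 1,
      ∃ j : Nat, 0 < j ∧
        j ≤ (PySem.List.pyRange 2 (PySem.Int.floordiv (PySem.List.len (PySem.Int.toChars e)) p + 1) 1).length ∧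
        y = repNI v p.toNat j ∧ start ≤ y ∧ y ≤ e) ?_]
  · constructor
    · rintro (h | h)
      · exact absurd h (by simp [PySem.Set.empty])
      · exact h
    · exact Or.inr
  · intro s p z
    rw [foldl_set_mem _ _ (fun v z =>
      ∃ j : Nat, 0 < j ∧
        j ≤ (PySem.List.pyRange 2 (PySem.Int.floordiv (PySem.List.len (PySem.Int.toChars e)) p + 1) 1).length ∧
        z = repNI v p.toNat j ∧ start ≤ z ∧ z ≤ e) ?_]
    intro s' v z'
    exact inner_mem0 start e v p.toNat _ s' z'

theorem seenOf_mem (start e y : Int) :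
    y ∈ seenOf start e ↔ start ≤ y ∧ y ≤ e ∧ Periodic y := by
  rw [seenOf_mem_raw]
  have hlen : PySem.List.len (PySem.Int.toChars e) = ((PySem.Int.toChars e).length : Int) :=
    PySem.List.len_eq _
  constructor
  · rintro ⟨p, hp, v, hv, j, hj0, hjle, hy, hy1, hy2⟩
    rw [PySem.List.mem_pyRange_one] at hp hv
    have hp1 : 1 ≤ p := hp.1
    have hv1 : (10:Int) ^ (p - 1).toNat ≤ v := hv.1
    have hv0 : (1:Int) ≤ v := by
      have := pow_pos (by norm_num : (0:Int) < 10) (p - 1).toNat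
      omega
    refine ⟨hy1, hy2, p.toNat, v.toNat, j, by omega, ?_, ?_, by omega, ?_⟩
    · have hcast : ((10:Int) ^ (p - 1).toNat) = (((10:Nat) ^ (p-1).toNat : Nat) : Int) := by push_cast; rfl
      have : (p - 1).toNat = p.toNat - 1 := by omega
      rw [hcast, this] at hv1
      omega
    · have hcast : ((10:Int) ^ p.toNat) = (((10:Nat) ^ p.toNat : Nat) : Int) := by push_cast; rfl
      have hv2 := hv.2
      rw [hcast] at hv2
      omega
    · have : (v.toNat : Int) = v := by omega
      rw [← repNI_natCast, this]
      exact hy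
  · rintro ⟨hy1, hy2, P, v, j, hP, hvge, hvlt, hj, hy⟩
    have hv0 : 1 ≤ v := le_trans (Nat.one_le_pow _ _ (by norm_num)) hvge
    have h10 : 10 < repN v P j := ten_lt_repN v P j hP hv0 hj
    have hy10 : (10:Int) < y := by rw [hy]; exact_mod_cast h10
    have he10 : (10:Int) < e := lt_of_lt_of_le hy10 hy2
    have hepos : (0:Int) < e := by omega
    -- the digit length of e
    have hcap : (PySem.Int.toChars e).length = (Nat.digits 10 e.toNat).length := by
      rw [toChars_pos e hepos]; simp
    set D := (Nat.digits 10 e.toNat).length with hD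
    have hdvlen : (Nat.digits 10 v).length = P := len_digits_eq v P hP hvge hvlt
    have hylen : (Nat.digits 10 (repN v P j)).length = (j + 1) * P := by
      rw [digits_repN v P hdvlen j, length_flatten_replicate, hdvlen]
    have hmono : (j + 1) * P ≤ D := by
      rw [← hylen, hD]
      exact digits_len_mono _ _ (by omega)
    have hPD : P ≤ D / 2 := by
      rw [Nat.le_div_iff_mul_le (by norm_num)]
      nlinarith
    have hjD : j + 1 ≤ D / P := by
      rw [Nat.le_div_iff_mul_le (by omega)]
      nlinarith
    have hfd2 : PySem.Int.floordiv ((D:Nat) : Int) 2 = ((D / 2 : Nat) : Int) := by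
      exact_mod_cast PySem.Int.floordiv_natCast D 2
    have hfdP : PySem.Int.floordiv ((D:Nat) : Int) ((P:Nat) : Int) = ((D / P : Nat) : Int) := by
      exact_mod_cast PySem.Int.floordiv_natCast D P
    refine ⟨(P : Int), ?_, (v : Int), ?_, j, by omega, ?_, ?_, hy1, hy2⟩
    · rw [PySem.List.mem_pyRange_one, hlen, hcap, hfd2]
      constructor
      · exact_mod_cast hP
      · have : (P : Int) ≤ ((D / 2 : Nat) : Int) := by exact_mod_cast hPD
        omega
    · rw [PySem.List.mem_pyRange_one]
      have h1 : ((P : Int) - 1).toNat = P - 1 := by omega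
      constructor
      · rw [h1]
        exact_mod_cast hvge
      · rw [Int.toNat_natCast]
        exact_mod_cast hvlt
    · rw [PySem.List.length_pyRange_one, hlen, hcap, hfdP]
      have : ((D / P : Nat) : Int) ≥ (j:Int) + 1 := by exact_mod_cast hjD
      omega
    · rw [Int.toNat_natCast, repNI_natCast]
      exact hy

-- ---------- per-range equality and assembly ----------

theorem range_sum_eq (start e : Int) :
    ((PySem.List.pyRange start (e + 1) 1).filter invalidABool).sum = (seenOf start e).sum := by
  apply List.Perm.sum_eq
  rw [List.perm_ext_iff_of_nodup (List.Nodup.filter _ (PySem.List.nodup_pyRange_one start (e+1))) (seenOf_nodup start e)]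
  intro a
  rw [List.mem_filter, PySem.List.mem_pyRange_one, seenOf_mem, anyA_iff, invalidA_iff_Periodic]
  constructor
  · rintro ⟨⟨h1, h2⟩, h3⟩
    exact ⟨h1, by omega, h3⟩
  · rintro ⟨h1, h2, h3⟩
    exact ⟨⟨h1, by omega⟩, h3⟩

-- ===== VERDICT (by name: the statement is the Claim_ definition above) =====
theorem part_two_spec : Claim_equal_part_two := by
  intro data _
  unfold Spec_part_two
  rw [part_two_alt_eq]
  unfold part_two
  refine Eq.trans (PySem.List.foldl_congr_mem _ _
      (fun acc se => acc + ((PySem.List.pyRange se.1 (se.2 + 1) 1).filter invalidABool).sum) _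
      (fun acc se _ => A_range se.1 se.2 acc)) ?_
  exact PySem.List.foldl_congr_mem _ _ _ _ (fun acc se _ => by rw [range_sum_eq])
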